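-- pv_equiv track=rewrite | github.com/Huthayfa0/universal-puzzle-solver | solver/shakashaka_solver.py | _is_axis_aligned_rectangle
-- ===== SOURCE A (Python) =====
-- def _is_axis_aligned_rectangle(comp):
--     """Check if component (set of (i,j)) is an axis-aligned rectangle (no holes)."""
--     if not comp:
--         return True
--     is_ = [p[0] for p in comp]
--     js = [p[1] for p in comp]
--     i_min, i_max = min(is_), max(is_)
--     j_min, j_max = min(js), max(js)
--     expected = (i_max - i_min + 1) * (j_max - j_min + 1)
--     return len(comp) == expected
-- ===== SOURCE B (Python) =====
-- def _is_axis_aligned_rectangle(comp):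
--     """Check if component (set of (i,j)) is an axis-aligned rectangle (no holes)."""
--     if not comp:
--         return True
--     it = iter(comp)
--     i0, j0 = next(it)
--     i_min = i_max = i0
--     j_min = j_max = j0
--     for i, j in it:
--         i_min = min(i_min, i)
--         i_max = max(i_max, i)
--         j_min = min(j_min, j)
--         j_max = max(j_max, j)
--     for i in range(i_min, i_max + 1):
--         for j in range(j_min, j_max + 1):
--             if (i, j) not in comp:
--                 return False
--     return True
-- ===== Notes on version B (the rewrite author's own statement) =====
-- stated objective: alternative
-- what changed: Replaces the count-vs-area arithmetic (len(comp) == bounding-box area) with a single min/max accumulation pass followed by an exhaustive membership scan of every cell of the bounding box, returning False at the first missing cell; Pre_ requires the list of pairs to be duplicate-free, which is automatic since comp is a Python set.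
import Mathlib
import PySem

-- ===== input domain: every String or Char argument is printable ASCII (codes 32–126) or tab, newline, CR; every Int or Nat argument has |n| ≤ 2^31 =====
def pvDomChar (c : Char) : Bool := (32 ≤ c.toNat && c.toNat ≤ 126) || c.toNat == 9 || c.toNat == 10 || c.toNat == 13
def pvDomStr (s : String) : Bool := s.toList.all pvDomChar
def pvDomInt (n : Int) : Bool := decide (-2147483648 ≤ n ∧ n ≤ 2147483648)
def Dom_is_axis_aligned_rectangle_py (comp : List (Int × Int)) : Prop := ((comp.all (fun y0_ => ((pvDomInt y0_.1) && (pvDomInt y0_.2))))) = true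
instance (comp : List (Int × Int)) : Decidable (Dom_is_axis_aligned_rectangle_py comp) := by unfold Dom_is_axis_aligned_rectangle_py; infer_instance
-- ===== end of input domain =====

-- B replaces A's count-vs-area arithmetic by a min/max pass plus an exhaustive
-- membership scan of the bounding box ('alternative' decomposition, same result).


-- ===== PORT A =====
def is_axis_aligned_rectangle_py (comp : List (Int × Int)) : Bool :=
  if comp = [] then true
  else
    let is_ := comp.map (fun p => p.1)
    let js := comp.map (fun p => p.2)
    match PySem.List.min? is_ (fun y => y), PySem.List.max? is_ (fun y => y),
          PySem.List.min? js (fun y => y), PySem.List.max? js (fun y => y) with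
    | some i_min, some i_max, some j_min, some j_max =>
        decide ((comp.length : Int) = (i_max - i_min + 1) * (j_max - j_min + 1))
    | _, _, _, _ => false   -- unreachable: comp nonempty

-- ===== PORT B =====
-- the inner 'for j in range(...)' loop with its early 'return False' (short-circuit &&)
def pvScanRow (comp : List (Int × Int)) (i j : Int) : Nat → Bool
  | 0 => true
  | n + 1 => comp.contains (i, j) && pvScanRow comp i (j + 1) n

-- the outer 'for i in range(...)' loop
def pvScanRows (comp : List (Int × Int)) (jm : Int) (nJ : Nat) (i : Int) : Nat → Bool
  | 0 => true
  | n + 1 => pvScanRow comp i jm nJ && pvScanRows comp jm nJ (i + 1) n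

def is_axis_aligned_rectangle_py_alt (comp : List (Int × Int)) : Bool :=
  match comp with
  | [] => true
  | p :: rest =>
    let b := rest.foldl
      (fun (acc : Int × Int × Int × Int) q =>
        (min acc.1 q.1, max acc.2.1 q.1, min acc.2.2.1 q.2, max acc.2.2.2 q.2))
      (p.1, p.1, p.2, p.2)
    pvScanRows (p :: rest) b.2.2.1 ((b.2.2.2 + 1 - b.2.2.1).toNat)
      b.1 ((b.2.1 + 1 - b.1).toNat)

-- ===== PRECONDITION & SPEC =====
-- comp encodes a Python set of pairs, so its list representation holds distinct
-- elements; Pre_ states exactly that (a duplicate-carrying list encodes no set).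
def Pre_is_axis_aligned_rectangle_py (comp : List (Int × Int)) : Prop := comp.Nodup
instance (comp : List (Int × Int)) : Decidable (Pre_is_axis_aligned_rectangle_py comp) := by unfold Pre_is_axis_aligned_rectangle_py; infer_instance
def pvWitness_is_axis_aligned_rectangle_py : (List (Int × Int)) := [(0, 0), (0, 1), (1, 0), (1, 1)]

def Spec_is_axis_aligned_rectangle_py (comp : List (Int × Int)) (out : Bool) : Prop := out = is_axis_aligned_rectangle_py_alt comp
instance (comp : List (Int × Int)) (out : Bool) : Decidable (Spec_is_axis_aligned_rectangle_py comp out) := by unfold Spec_is_axis_aligned_rectangle_py; infer_instance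

-- ===== CLAIM (what is proved, stated in full; the proofs are below) =====
def Claim_equal_is_axis_aligned_rectangle_py : Prop := ∀ (comp : List (Int × Int)), Dom_is_axis_aligned_rectangle_py comp → Pre_is_axis_aligned_rectangle_py comp → Spec_is_axis_aligned_rectangle_py comp (is_axis_aligned_rectangle_py comp)

-- ===== LEMMAS AND PROOFS =====

-- the early-exit scans are the 'all cells of the range are members' checks
theorem pv_scanRow_eq (comp : List (Int × Int)) (i j : Int) (n : Nat) :
    pvScanRow comp i j n
      = (PySem.List.pyRange j (j + n) 1).all (fun jj => comp.contains (i, jj)) := by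
  induction n generalizing j with
  | zero => simp [pvScanRow, PySem.List.pyRange_one_eq_nil]
  | succ k ih =>
    rw [pvScanRow, PySem.List.pyRange_one_cons (by omega : j < j + (k + 1 : Nat)), List.all_cons, ih,
        show (j + 1) + (k : Int) = j + ((k + 1 : Nat) : Int) by push_cast; ring]

theorem pv_scanRows_eq (comp : List (Int × Int)) (jm : Int) (nJ : Nat) (i : Int) (n : Nat) :
    pvScanRows comp jm nJ i n
      = (PySem.List.pyRange i (i + n) 1).all (fun ii => pvScanRow comp ii jm nJ) := by
  induction n generalizing i with
  | zero => simp [pvScanRows, PySem.List.pyRange_one_eq_nil]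
  | succ k ih =>
    rw [pvScanRows, PySem.List.pyRange_one_cons (by omega : i < i + (k + 1 : Nat)), List.all_cons, ih,
        show (i + 1) + (k : Int) = i + ((k + 1 : Nat) : Int) by push_cast; ring]

-- B's 4-tuple fold splits into four independent folds.
theorem pv_fold4_eq (rest : List (Int × Int)) (a b c d : Int) :
    rest.foldl
      (fun (acc : Int × Int × Int × Int) q =>
        (min acc.1 q.1, max acc.2.1 q.1, min acc.2.2.1 q.2, max acc.2.2.2 q.2))
      (a, b, c, d)
    = (rest.foldl (fun m q => min m q.1) a,
       rest.foldl (fun m q => max m q.1) b,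
       rest.foldl (fun m q => min m q.2) c,
       rest.foldl (fun m q => max m q.2) d) := by
  induction rest generalizing a b c d with
  | nil => rfl
  | cons x t ih => simp [List.foldl_cons, ih]

theorem pv_foldl_min_le (t : List Int) (a : Int) :
    t.foldl min a ≤ a ∧ ∀ x ∈ t, t.foldl min a ≤ x := by
  induction t generalizing a with
  | nil => simp
  | cons h t ih =>
    obtain ⟨h1, h2⟩ := ih (min a h)
    refine ⟨le_trans h1 (min_le_left _ _), ?_⟩
    intro x hx
    rcases List.mem_cons.mp hx with rfl | hx
    · exact le_trans h1 (min_le_right _ _)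
    · exact h2 x hx

theorem pv_le_foldl_max (t : List Int) (a : Int) :
    a ≤ t.foldl max a ∧ ∀ x ∈ t, x ≤ t.foldl max a := by
  induction t generalizing a with
  | nil => simp
  | cons h t ih =>
    obtain ⟨h1, h2⟩ := ih (max a h)
    refine ⟨le_trans (le_max_left _ _) h1, ?_⟩
    intro x hx
    rcases List.mem_cons.mp hx with rfl | hx
    · exact le_trans (le_max_right _ _) h1
    · exact h2 x hx

-- Counting argument: for nodup lists with comp ⊆ box, having equal length
-- is the same as box ⊆ comp.
theorem pv_count_iff_superset {α : Type} [DecidableEq α] (comp box : List α)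
    (hc : comp.Nodup) (hb : box.Nodup) (hsub : ∀ x ∈ comp, x ∈ box) :
    (comp.length = box.length ↔ ∀ x ∈ box, x ∈ comp) := by
  have hcs : comp.toFinset ⊆ box.toFinset := by
    intro x hx
    exact List.mem_toFinset.mpr (hsub x (List.mem_toFinset.mp hx))
  have hcard1 : comp.toFinset.card = comp.length := List.toFinset_card_of_nodup hc
  have hcard2 : box.toFinset.card = box.length := List.toFinset_card_of_nodup hb
  constructor
  · intro hlen x hx
    have : box.toFinset ⊆ comp.toFinset := by
      have := Finset.eq_of_subset_of_card_le hcs (by omega)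
      exact this.ge
    exact List.mem_toFinset.mp (this (List.mem_toFinset.mpr hx))
  · intro hsup
    have : comp.toFinset = box.toFinset := by
      apply Finset.Subset.antisymm hcs
      intro x hx
      exact List.mem_toFinset.mpr (hsup x (List.mem_toFinset.mp hx))
    rw [← hcard1, ← hcard2, this]

-- ===== VERDICT (by name: the statement is the Claim_ definition above) =====
theorem is_axis_aligned_rectangle_py_spec : Claim_equal_is_axis_aligned_rectangle_py := by
  intro comp _hdom hpre
  unfold Spec_is_axis_aligned_rectangle_py
  match comp with
  | [] => rfl
  | p :: rest =>
    unfold is_axis_aligned_rectangle_py is_axis_aligned_rectangle_py_alt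
    simp only [reduceCtorEq, if_false, List.map_cons]
    rw [PySem.List.min?_id_cons, PySem.List.max?_id_cons,
        PySem.List.min?_id_cons, PySem.List.max?_id_cons]
    simp only [pv_fold4_eq]
    have e1 : (rest.map (fun q : Int × Int => q.1)).foldl min p.1
        = rest.foldl (fun m q => min m q.1) p.1 := by rw [List.foldl_map]
    have e2 : (rest.map (fun q : Int × Int => q.1)).foldl max p.1
        = rest.foldl (fun m q => max m q.1) p.1 := by rw [List.foldl_map]
    have e3 : (rest.map (fun q : Int × Int => q.2)).foldl min p.2
        = rest.foldl (fun m q => min m q.2) p.2 := by rw [List.foldl_map]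
    have e4 : (rest.map (fun q : Int × Int => q.2)).foldl max p.2
        = rest.foldl (fun m q => max m q.2) p.2 := by rw [List.foldl_map]
    rw [← e1, ← e2, ← e3, ← e4]
    set im := (rest.map (fun q : Int × Int => q.1)).foldl min p.1 with him
    set iM := (rest.map (fun q : Int × Int => q.1)).foldl max p.1 with hiM
    set jm := (rest.map (fun q : Int × Int => q.2)).foldl min p.2 with hjm
    set jM := (rest.map (fun q : Int × Int => q.2)).foldl max p.2 with hjM
    -- bounds
    have hbnd : ∀ q ∈ p :: rest, im ≤ q.1 ∧ q.1 ≤ iM ∧ jm ≤ q.2 ∧ q.2 ≤ jM := by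
      intro q hq
      rcases List.mem_cons.mp hq with rfl | hq
      · exact ⟨(pv_foldl_min_le _ _).1, (pv_le_foldl_max _ _).1,
               (pv_foldl_min_le _ _).1, (pv_le_foldl_max _ _).1⟩
      · exact ⟨(pv_foldl_min_le _ _).2 _ (List.mem_map_of_mem hq),
               (pv_le_foldl_max _ _).2 _ (List.mem_map_of_mem hq),
               (pv_foldl_min_le _ _).2 _ (List.mem_map_of_mem hq),
               (pv_le_foldl_max _ _).2 _ (List.mem_map_of_mem hq)⟩
    have hp := hbnd p (List.mem_cons_self ..)
    have hii : im ≤ iM := le_trans hp.1 hp.2.1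
    have hjj : jm ≤ jM := le_trans hp.2.2.1 hp.2.2.2
    -- the bounding box as a list
    set box : List (Int × Int) :=
      (PySem.List.pyRange im (iM + 1) 1) ×ˢ (PySem.List.pyRange jm (jM + 1) 1) with hbox
    have hmem_box : ∀ x : Int × Int,
        x ∈ box ↔ (im ≤ x.1 ∧ x.1 < iM + 1) ∧ (jm ≤ x.2 ∧ x.2 < jM + 1) := by
      intro x
      rw [hbox, List.mem_product, PySem.List.mem_pyRange_one, PySem.List.mem_pyRange_one]
    have hb : box.Nodup :=
      List.Nodup.product (PySem.List.nodup_pyRange_one ..) (PySem.List.nodup_pyRange_one ..)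
    have hsub : ∀ x ∈ p :: rest, x ∈ box := by
      intro x hx
      obtain ⟨h1, h2, h3, h4⟩ := hbnd x hx
      exact (hmem_box x).mpr ⟨⟨h1, by omega⟩, ⟨h3, by omega⟩⟩
    have hboxlen : (box.length : Int) = (iM - im + 1) * (jM - jm + 1) := by
      rw [hbox, List.length_product, PySem.List.length_pyRange_one,
          PySem.List.length_pyRange_one]
      push_cast
      rw [Int.toNat_of_nonneg (by omega), Int.toNat_of_nonneg (by omega)]
      ring
    -- turn the early-exit scans into 'all' over the box ranges
    have hA : im + (((iM + 1 - im).toNat : Nat) : Int) = iM + 1 := by omega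
    have hB : jm + (((jM + 1 - jm).toNat : Nat) : Int) = jM + 1 := by omega
    rw [pv_scanRows_eq, hA]
    simp only [pv_scanRow_eq, hB]
    -- reduce both sides to decidable propositions and compare
    rw [Bool.eq_iff_iff, decide_eq_true_iff, List.all_eq_true]
    rw [← hboxlen, Int.natCast_inj,
        pv_count_iff_superset (p :: rest) box hpre hb hsub]
    constructor
    · intro hall i hi
      rw [List.all_eq_true]
      intro j hj
      rw [List.contains_iff_mem]
      exact hall (i, j) ((hmem_box (i, j)).mpr
        ⟨PySem.List.mem_pyRange_one.mp hi, PySem.List.mem_pyRange_one.mp hj⟩)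
    · intro hall x hx
      obtain ⟨⟨h1, h2⟩, h3, h4⟩ := (hmem_box x).mp hx
      have := hall x.1 (PySem.List.mem_pyRange_one.mpr ⟨h1, h2⟩)
      rw [List.all_eq_true] at this
      have := this x.2 (PySem.List.mem_pyRange_one.mpr ⟨h3, h4⟩)
      rwa [List.contains_iff_mem] at this
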